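-- pv_equiv track=rewrite | github.com/gabikadlecova/zc_combine | zc_combine/predictors/gnn.py | get_layer_sizes
-- ===== SOURCE A (Python) =====
-- def get_layer_sizes(n_layers, hidden_size, first_size=None, last_size=None):
--     for i in range(n_layers):
--         if i == 0 and first_size is not None:
--             yield first_size, hidden_size
--         elif i == (n_layers - 1) and last_size is not None:
--             yield hidden_size, last_size
--         else:
--             yield hidden_size, hidden_size
-- ===== SOURCE B (Python) =====
-- def get_layer_sizes(n_layers, hidden_size, first_size=None, last_size=None):
--     if n_layers <= 0:
--         return
--     widths = [hidden_size] * (n_layers + 1)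
--     if first_size is not None:
--         widths[0] = first_size
--     if last_size is not None:
--         widths[-1] = last_size
--     yield from zip(widths, widths[1:])
-- ===== Notes on version B (the rewrite author's own statement) =====
-- stated objective: alternative
-- what changed: Instead of branching on the loop index, B builds the list of layer widths (input width, n-1 hidden widths, output width) and zips adjacent widths into (in,out) pairs.
-- intended difference: On n_layers == 1 with both first_size and last_size given (and last_size != hidden_size), A returns [(first_size, hidden_size)], silently ignoring the requested output size; B returns [(first_size, last_size)], the intended single-layer shape connecting the given input and output sizes. — e.g. on get_layer_sizes(1, 5, some 3, some 7): A returns [(3, 5)], B returns [(3, 7)]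
import Mathlib
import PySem

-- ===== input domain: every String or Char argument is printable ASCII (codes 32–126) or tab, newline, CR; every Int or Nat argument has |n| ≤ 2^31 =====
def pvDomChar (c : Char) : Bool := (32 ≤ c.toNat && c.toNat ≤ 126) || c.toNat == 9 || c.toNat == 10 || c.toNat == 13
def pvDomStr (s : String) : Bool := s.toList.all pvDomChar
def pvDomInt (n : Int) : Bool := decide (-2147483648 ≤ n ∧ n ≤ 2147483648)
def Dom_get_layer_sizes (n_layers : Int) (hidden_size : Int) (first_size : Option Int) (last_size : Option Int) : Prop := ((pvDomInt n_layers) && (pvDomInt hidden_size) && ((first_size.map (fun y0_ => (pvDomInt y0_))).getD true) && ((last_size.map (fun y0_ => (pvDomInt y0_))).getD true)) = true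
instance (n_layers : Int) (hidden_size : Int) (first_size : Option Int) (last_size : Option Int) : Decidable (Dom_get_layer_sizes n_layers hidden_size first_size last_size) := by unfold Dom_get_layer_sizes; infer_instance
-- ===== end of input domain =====

-- ===== PORT A =====
-- B builds the layer-width list and zips adjacent widths instead of branching on the loop
-- index (alternative decomposition); return value only (both Pythons are generators, compared as lists).
def get_layer_sizes (n_layers : Int) (hidden_size : Int) (first_size : Option Int) (last_size : Option Int) : List (Int × Int) :=
  (PySem.List.pyRange 0 n_layers 1).foldl (fun acc i =>
    acc ++ [if i = 0 ∧ first_size ≠ none then (first_size.getD 0, hidden_size)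
            else if i = n_layers - 1 ∧ last_size ≠ none then (hidden_size, last_size.getD 0)
            else (hidden_size, hidden_size)]) []

-- ===== PORT B =====
def get_layer_sizes_alt (n_layers : Int) (hidden_size : Int) (first_size : Option Int) (last_size : Option Int) : List (Int × Int) :=
  if n_layers ≤ 0 then []
  else
    let w0 := PySem.List.pyRepeat [hidden_size] (n_layers + 1)      -- [hidden_size] * (n_layers + 1)
    let w1 := match first_size with
              | some fv => w0.set 0 fv                               -- widths[0] = first_size
              | none => w0
    let w2 := match last_size with
              | some lv => w1.set (w1.length - 1) lv                 -- widths[-1] = last_size (len ≥ 2)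
              | none => w1
    w2.zip (PySem.List.slice w2 (some 1) none)                       -- zip(widths, widths[1:])

-- ===== PRECONDITION & SPEC =====
-- On n_layers == 1 with both first_size and last_size given (and last_size ≠ hidden_size),
-- A returns [(first_size, hidden_size)], ignoring the requested output size; B returns
-- [(first_size, last_size)], the intended single-layer shape connecting input and output sizes.
def D_get_layer_sizes (n_layers : Int) (hidden_size : Int) (first_size : Option Int) (last_size : Option Int) : Prop :=
  n_layers = 1 ∧ first_size ≠ none ∧ last_size ≠ none ∧ last_size ≠ some hidden_size
instance (n_layers : Int) (hidden_size : Int) (first_size : Option Int) (last_size : Option Int) : Decidable (D_get_layer_sizes n_layers hidden_size first_size last_size) := by unfold D_get_layer_sizes; infer_instance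

def Spec_get_layer_sizes (n_layers : Int) (hidden_size : Int) (first_size : Option Int) (last_size : Option Int) (out : List (Int × Int)) : Prop := ¬ D_get_layer_sizes n_layers hidden_size first_size last_size → out = get_layer_sizes_alt n_layers hidden_size first_size last_size
instance (n_layers : Int) (hidden_size : Int) (first_size : Option Int) (last_size : Option Int) (out : List (Int × Int)) : Decidable (Spec_get_layer_sizes n_layers hidden_size first_size last_size out) := by unfold Spec_get_layer_sizes; infer_instance

def pvDiffWitness_get_layer_sizes : Int × Int × Option Int × Option Int := (1, 5, some 3, some 7)
def pvDiffWitnessOut_get_layer_sizes : (List (Int × Int)) × (List (Int × Int)) := ([(3, 5)], [(3, 7)])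

-- ===== CLAIM =====
def Claim_unchanged_get_layer_sizes : Prop := ∀ (n_layers : Int) (hidden_size : Int) (first_size : Option Int) (last_size : Option Int), Dom_get_layer_sizes n_layers hidden_size first_size last_size → Spec_get_layer_sizes n_layers hidden_size first_size last_size (get_layer_sizes n_layers hidden_size first_size last_size)
def Claim_changed_get_layer_sizes : Prop := Dom_get_layer_sizes (pvDiffWitness_get_layer_sizes.1) (pvDiffWitness_get_layer_sizes.2.1) (pvDiffWitness_get_layer_sizes.2.2.1) (pvDiffWitness_get_layer_sizes.2.2.2) ∧ D_get_layer_sizes (pvDiffWitness_get_layer_sizes.1) (pvDiffWitness_get_layer_sizes.2.1) (pvDiffWitness_get_layer_sizes.2.2.1) (pvDiffWitness_get_layer_sizes.2.2.2) ∧ get_layer_sizes (pvDiffWitness_get_layer_sizes.1) (pvDiffWitness_get_layer_sizes.2.1) (pvDiffWitness_get_layer_sizes.2.2.1) (pvDiffWitness_get_layer_sizes.2.2.2) = pvDiffWitnessOut_get_layer_sizes.1 ∧ get_layer_sizes_alt (pvDiffWitness_get_layer_sizes.1) (pvDiffWitness_get_layer_sizes.2.1) (pvDiffWitness_get_layer_sizes.2.2.1)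 (pvDiffWitness_get_layer_sizes.2.2.2) = pvDiffWitnessOut_get_layer_sizes.2 ∧ pvDiffWitnessOut_get_layer_sizes.1 ≠ pvDiffWitnessOut_get_layer_sizes.2
def Claim_exact_get_layer_sizes : Prop := ∀ (n_layers : Int) (hidden_size : Int) (first_size : Option Int) (last_size : Option Int), Dom_get_layer_sizes n_layers hidden_size first_size last_size → D_get_layer_sizes n_layers hidden_size first_size last_size → get_layer_sizes n_layers hidden_size first_size last_size ≠ get_layer_sizes_alt n_layers hidden_size first_size last_size

-- ===== LEMMAS AND PROOFS =====

-- A as a map over the index range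
theorem gls_eq_map (n h : Int) (f l : Option Int) :
    get_layer_sizes n h f l = (PySem.List.pyRange 0 n 1).map (fun i =>
      if i = 0 ∧ f ≠ none then (f.getD 0, h)
      else if i = n - 1 ∧ l ≠ none then (h, l.getD 0)
      else (h, h)) := by
  unfold get_layer_sizes
  rw [PySem.List.foldl_append_singleton_eq_map]
  simp

-- A's canonical value for n ≥ 2
theorem gls_canon (n h : Int) (f l : Option Int) (h2 : 2 ≤ n) :
    get_layer_sizes n h f l =
      (f.getD h, h) :: (List.replicate (n.toNat - 2) (h, h) ++ [(h, l.getD h)]) := by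
  rw [gls_eq_map]
  rw [PySem.List.pyRange_one_append 0 1 n (by omega) (by omega),
      PySem.List.pyRange_one_append 1 (n-1) n (by omega) (by omega)]
  have hfirst : PySem.List.pyRange 0 1 1 = [0] := by decide
  have hlast : PySem.List.pyRange (n-1) n 1 = [n-1] := by
    have := PySem.List.pyRange_one_singleton (n-1)
    simpa [show n - 1 + 1 = n by omega] using this
  rw [hfirst, hlast]
  simp only [List.map_append, List.map_cons, List.map_nil]
  have hmid : (PySem.List.pyRange 1 (n-1) 1).map (fun i =>
      if i = 0 ∧ f ≠ none then (f.getD 0, h)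
      else if i = n - 1 ∧ l ≠ none then (h, l.getD 0)
      else (h, h)) = List.replicate (n.toNat - 2) (h, h) := by
    have hc : (PySem.List.pyRange 1 (n-1) 1).map (fun i =>
        if i = 0 ∧ f ≠ none then (f.getD 0, h)
        else if i = n - 1 ∧ l ≠ none then (h, l.getD 0)
        else (h, h)) = (PySem.List.pyRange 1 (n-1) 1).map (fun _ => (h, h)) := by
      apply List.map_congr_left
      intro i hi
      rw [PySem.List.mem_pyRange_one] at hi
      have h0 : ¬ (i = 0) := by omega
      have h1 : ¬ (i = n - 1) := by omega
      simp [h0, h1]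
    rw [hc, List.map_const', PySem.List.length_pyRange_one]
    congr 1
    omega
  rw [hmid]
  cases f <;> cases l <;>
    simp [show ¬((0:Int) = n - 1) by omega, show (n - 1 : Int) ≠ 0 by omega]

-- setting the last element of a replicate
theorem set_replicate_last (m : Nat) (x v : Int) :
    (List.replicate (m + 1) x).set m v = List.replicate m x ++ [v] := by
  induction m with
  | zero => rfl
  | succ k ih =>
    rw [List.replicate_succ, List.set_cons_succ, ih]
    simp [List.replicate_succ]

-- zipping adjacent elements of a :: h^m ++ [b]
theorem zip_adj (h b : Int) : ∀ (m : Nat) (a : Int),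
    (a :: (List.replicate m h ++ [b])).zip (List.replicate m h ++ [b]) =
      (match m with
       | 0 => [(a, b)]
       | Nat.succ k => (a, h) :: (List.replicate k (h, h) ++ [(h, b)])) := by
  intro m
  induction m with
  | zero => intro a; rfl
  | succ k ih =>
    intro a
    simp only [List.replicate_succ, List.cons_append, List.zip_cons_cons]
    rw [ih h]
    cases k <;> simp [List.replicate_succ]

-- B's widths list after the two assignments, for n ≥ 1
theorem alt_widths (n h : Int) (f l : Option Int) (h1 : 1 ≤ n) :
    get_layer_sizes_alt n h f l =
      ((f.getD h) :: (List.replicate (n.toNat - 1) h ++ [l.getD h])).zip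
        (List.replicate (n.toNat - 1) h ++ [l.getD h]) := by
  unfold get_layer_sizes_alt
  rw [if_neg (by omega)]
  obtain ⟨m, hm⟩ : ∃ m : Nat, (n + 1).toNat = m + 2 := ⟨n.toNat - 1, by omega⟩
  have hm' : n.toNat - 1 = m := by omega
  have hrep : PySem.List.pyRepeat [h] (n + 1) = List.replicate (m + 2) h := by
    rw [PySem.List.pyRepeat_singleton, hm]
  have s0 : ∀ fv : Int, (List.replicate (m + 2) h).set 0 fv = fv :: List.replicate (m + 1) h := by
    intro fv; simp [List.replicate_succ]
  have srep1 : List.replicate (m + 1) h = List.replicate m h ++ [h] := List.replicate_succ' ..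
  cases f with
  | none =>
    cases l with
    | none =>
      simp only [hrep, hm', PySem.List.slice_from_one, Option.getD_none]
      rw [show List.replicate (m + 2) h = h :: List.replicate (m + 1) h from rfl, List.tail_cons, srep1]
    | some lv =>
      simp only [hrep, hm', PySem.List.slice_from_one, Option.getD_none, Option.getD_some,
        List.length_replicate]
      rw [show m + 2 - 1 = m + 1 from rfl, List.replicate_succ, List.set_cons_succ,
        set_replicate_last, List.tail_cons]
  | some fv =>
    cases l with
    | none =>
      simp only [hrep, hm', PySem.List.slice_from_one, Option.getD_none, Option.getD_some, s0]
      rw [List.tail_cons, srep1]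
    | some lv =>
      simp only [hrep, hm', PySem.List.slice_from_one, Option.getD_some, s0, List.length_cons,
        List.length_replicate]
      rw [show m + 1 + 1 - 1 = m + 1 from rfl, List.set_cons_succ, set_replicate_last,
        List.tail_cons]

-- B's canonical value for n ≥ 1
theorem alt_canon (n h : Int) (f l : Option Int) (h1 : 1 ≤ n) :
    get_layer_sizes_alt n h f l =
      (match n.toNat - 1 with
       | 0 => [(f.getD h, l.getD h)]
       | Nat.succ k => (f.getD h, h) :: (List.replicate k (h, h) ++ [(h, l.getD h)])) := by
  rw [alt_widths n h f l h1]
  exact zip_adj h (l.getD h) (n.toNat - 1) (f.getD h)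

-- ===== VERDICT =====
theorem get_layer_sizes_spec : Claim_unchanged_get_layer_sizes := by
  intro n h f l _hd hnd
  by_cases h0 : n ≤ 0
  · rw [gls_eq_map]
    unfold get_layer_sizes_alt
    simp [h0, PySem.List.pyRange_one_eq_nil (by omega : (n:Int) ≤ 0)]
  · by_cases h1 : n = 1
    · subst h1
      rw [gls_eq_map]
      have hone : PySem.List.pyRange 0 1 1 = [0] := by decide
      rw [hone, alt_canon 1 h f l (by omega)]
      unfold D_get_layer_sizes at hnd
      cases f with
      | none => cases l <;> simp
      | some fv =>
        cases l with
        | none => simp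
        | some lv =>
          have : lv = h := by
            by_contra hne
            exact hnd ⟨rfl, by simp, by simp, by simp [hne]⟩
          subst this
          simp
    · have h2 : 2 ≤ n := by omega
      rw [gls_canon n h f l h2, alt_canon n h f l (by omega)]
      have : n.toNat - 1 = (n.toNat - 2) + 1 := by omega
      rw [this]

theorem get_layer_sizes_changed : Claim_changed_get_layer_sizes := by
  unfold Claim_changed_get_layer_sizes; decide

theorem get_layer_sizes_tight : Claim_exact_get_layer_sizes := by
  intro n h f l _hd hD
  obtain ⟨h1, hf, hl, hlh⟩ := hD
  subst h1
  obtain ⟨fv, rfl⟩ := Option.ne_none_iff_exists'.mp hf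
  obtain ⟨lv, rfl⟩ := Option.ne_none_iff_exists'.mp hl
  have hlv : lv ≠ h := fun he => hlh (by rw [he])
  rw [gls_eq_map]
  have hone : PySem.List.pyRange 0 1 1 = [0] := by decide
  rw [hone, alt_canon 1 h (some fv) (some lv) (by omega)]
  simp [Ne.symm hlv]
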